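-- pv_equiv track=rewrite | github.com/JBoyles-USF/Global_k_means | src/lb_functions.py | unique_inverse
-- ===== SOURCE A (Python) =====
-- def unique_inverse(A):
--     out = []
--     out_idx = []
--     seen = {}
--
--     for idx, x in enumerate(A):
--         if x not in seen:
--             seen[x] = len(seen)
--             out.append(x)
--             out_idx.append([])
--         out_idx[seen[x]].append(idx)
--
--     return out, out_idx
-- ===== SOURCE B (Python) =====
-- def unique_inverse(A):
--     out = list(dict.fromkeys(A))
--     out_idx = [[i for i, x in enumerate(A) if x == v] for v in out]
--     return out, out_idx
-- ===== Notes on version B (the rewrite author's own statement) =====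
-- stated objective: simpler
-- what changed: Removes the single-pass grouping with parallel out/out_idx/seen state entirely: B first deduplicates A (dict.fromkeys, first-appearance order) and then builds each index list by a separate per-value scan of enumerate(A), trading one stateful grouping pass for two stateless staged passes.
import Mathlib
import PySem

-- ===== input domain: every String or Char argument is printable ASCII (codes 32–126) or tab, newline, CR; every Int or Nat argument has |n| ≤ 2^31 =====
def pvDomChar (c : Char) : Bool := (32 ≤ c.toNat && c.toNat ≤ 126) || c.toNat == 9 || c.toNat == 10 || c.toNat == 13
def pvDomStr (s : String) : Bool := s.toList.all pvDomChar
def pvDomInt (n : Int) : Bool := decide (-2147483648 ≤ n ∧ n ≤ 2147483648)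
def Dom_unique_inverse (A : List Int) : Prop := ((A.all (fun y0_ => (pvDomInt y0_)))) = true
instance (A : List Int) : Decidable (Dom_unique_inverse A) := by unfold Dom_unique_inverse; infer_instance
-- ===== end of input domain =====

-- B drops A's stateful single-pass grouping (out/out_idx/seen) for two staged stateless
-- passes: dedup first, then a per-value index scan (objective: simpler; not faster).

-- ===== PORT A =====
-- one step of A's loop body: st = (out, out_idx, seen), p = (idx, x)
def uiStep (st : List Int × List (List Int) × PySem.Dict Int Int) (p : Int × Int) :
    List Int × List (List Int) × PySem.Dict Int Int :=
  let out := st.1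
  let out_idx := st.2.1
  let seen := st.2.2
  let idx := p.1
  let x := p.2
  let fresh := !(seen.contains x)          -- 'x not in seen'
  let seen' := if fresh then seen.insert x (seen.size : Int) else seen
  let out' := if fresh then out ++ [x] else out
  let out_idx' := if fresh then out_idx ++ [[]] else out_idx
  let j := seen'.getD x 0                  -- seen[x] (present by now)
  (out', PySem.List.pySetD out_idx' j (PySem.List.pyGetD out_idx' j [] ++ [idx]), seen')

def unique_inverse (A : List Int) : List Int × List (List Int) :=
  let r := (PySem.List.enumerate A 0).foldl uiStep ([], [], PySem.Dict.empty)
  (r.1, r.2.1)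

-- ===== PORT B =====
def unique_inverse_alt (A : List Int) : List Int × List (List Int) :=
  let out := PySem.Set.ofList A            -- list(dict.fromkeys(A)): distinct values, first-appearance order
  let out_idx := out.map (fun v =>
    ((PySem.List.enumerate A 0).filter (fun p => p.2 == v)).map (·.1))   -- [i for i, x in enumerate(A) if x == v]
  (out, out_idx)

-- ===== PRECONDITION & SPEC =====
def Spec_unique_inverse (A : List Int) (out : List Int × List (List Int)) : Prop := out = unique_inverse_alt A
instance (A : List Int) (out : List Int × List (List Int)) : Decidable (Spec_unique_inverse A out) := by unfold Spec_unique_inverse; infer_instance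

-- ===== CLAIM (what is proved, stated in full; the proofs are below) =====
def Claim_equal_unique_inverse : Prop := ∀ (A : List Int), Dom_unique_inverse A → Spec_unique_inverse A (unique_inverse A)

-- ===== LEMMAS AND PROOFS =====

-- indices at which k occurs in l (B's inner comprehension, named for the proofs)
def gIdx (l : List Int) (k : Int) : List Int :=
  ((PySem.List.enumerate l 0).filter (fun p => p.2 == k)).map (·.1)

-- A's 'seen' dict after processing l: each distinct value mapped to its position of first appearance
def seenOf (l : List Int) : PySem.Dict Int Int :=
  PySem.Dict.mk ((PySem.List.enumerate (PySem.Set.ofList l) 0).map (fun p => (p.2, p.1)))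

lemma gIdx_append (l : List Int) (x k : Int) :
    gIdx (l ++ [x]) k = gIdx l k ++ (if x == k then [(l.length : Int)] else []) := by
  by_cases h : x = k
  · subst h
    simp [gIdx, PySem.List.enumerate_append, PySem.List.enumerate_cons, PySem.List.enumerate_nil,
      List.filter_append]
  · simp [gIdx, PySem.List.enumerate_append, PySem.List.enumerate_cons, PySem.List.enumerate_nil,
      List.filter_append, h]

lemma gIdx_nil_of_not_mem (l : List Int) (x : Int) (hx : x ∉ l) : gIdx l x = [] := by
  simp only [gIdx, List.map_eq_nil_iff, List.filter_eq_nil_iff]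
  intro p hp
  have : p.2 ∈ l := by
    have hm : p.2 ∈ (PySem.List.enumerate l 0).map (·.2) := List.mem_map_of_mem hp
    simpa [PySem.List.map_snd_enumerate] using hm
  simp
  rintro rfl; exact hx this

lemma keys_seenOf (l : List Int) : (seenOf l).keys = PySem.Set.ofList l := by
  simp [seenOf, PySem.Dict.keys, List.map_map]
  exact PySem.List.map_snd_enumerate _ _

lemma contains_seenOf (l : List Int) (x : Int) :
    (seenOf l).contains x = decide (x ∈ l) := by
  simp [PySem.Dict.contains_eq_decide_mem_keys, keys_seenOf, PySem.Set.mem_ofList]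

lemma size_seenOf (l : List Int) : (seenOf l).size = (PySem.Set.ofList l).length := by
  simp [seenOf, PySem.Dict.size]

lemma getD_seenOf (l : List Int) (x : Int) (k : Nat) (hk : k < (PySem.Set.ofList l).length)
    (hSk : (PySem.Set.ofList l)[k] = x) : (seenOf l).getD x 0 = (k : Int) := by
  apply PySem.Dict.getD_of_mem_items
  · show (x, (k : Int)) ∈ (PySem.List.enumerate (PySem.Set.ofList l) 0).map (fun p => (p.2, p.1))
    have hmem : ((0 : Int) + (k : Int), (PySem.Set.ofList l)[k]) ∈ PySem.List.enumerate (PySem.Set.ofList l) 0 :=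
      (PySem.List.mem_enumerate_iff _ _ _).mpr ⟨k, hk, rfl⟩
    have := List.mem_map_of_mem (f := fun p => (p.2, p.1)) hmem
    simpa [hSk] using this
  · rw [keys_seenOf]; exact PySem.Set.nodup_ofList l

lemma seenOf_append_mem (l : List Int) (x : Int) (hx : x ∈ l) :
    seenOf (l ++ [x]) = seenOf l := by
  unfold seenOf
  rw [PySem.Set.ofList_append_singleton, PySem.Set.add_of_mem (by simpa [PySem.Set.mem_ofList] using hx)]

lemma seenOf_append_fresh (l : List Int) (x : Int) (hx : x ∉ l) :
    (seenOf l).insert x ((seenOf l).size : Int) = seenOf (l ++ [x]) := by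
  have hS : PySem.Set.ofList (l ++ [x]) = PySem.Set.ofList l ++ [x] := by
    rw [PySem.Set.ofList_append_singleton,
      PySem.Set.add_of_not_mem (by simpa [PySem.Set.mem_ofList] using hx)]
  apply PySem.Dict.ext
  rw [PySem.Dict.items_insert_of_not_contains _ _ (by simp [contains_seenOf, hx])]
  rw [size_seenOf]
  simp [seenOf, hS, PySem.List.enumerate_append, PySem.List.enumerate_cons,
    PySem.List.enumerate_nil]

lemma set_map_gIdx_mem (l : List Int) (x : Int) (k : Nat) (hk : k < (PySem.Set.ofList l).length)
    (hSk : (PySem.Set.ofList l)[k] = x) :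
    ((PySem.Set.ofList l).map (gIdx l)).set k (gIdx l x ++ [(l.length : Int)])
      = (PySem.Set.ofList l).map (gIdx (l ++ [x])) := by
  have hnd := PySem.Set.nodup_ofList l
  apply List.ext_getElem (by simp)
  intro p hp1 hp2
  simp only [List.length_map] at hp2
  rw [List.getElem_set]
  simp only [List.getElem_map]
  rw [gIdx_append]
  by_cases hpk : p = k
  · subst hpk
    simp [hSk]
  · have hne : (PySem.Set.ofList l)[p] ≠ x := by
      intro h
      exact hpk (hnd.getElem_inj_iff.mp (h.trans hSk.symm))
    simp [Ne.symm hpk, Ne.symm hne]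

lemma set_map_gIdx_fresh (l : List Int) (x : Int) (hx : x ∉ l) :
    ((PySem.Set.ofList l).map (gIdx l) ++ [[]]).set (PySem.Set.ofList l).length
        ([] ++ [(l.length : Int)])
      = (PySem.Set.ofList l ++ [x]).map (gIdx (l ++ [x])) := by
  rw [List.set_append_right _ _ (by simp)]
  simp only [List.length_map, Nat.sub_self, List.set_cons_zero, List.nil_append, List.map_append,
    List.map_cons, List.map_nil]
  congr 1
  · apply List.map_congr_left
    intro y hy
    have hyx : x ≠ y := by
      intro h; subst h
      exact hx (by simpa [PySem.Set.mem_ofList] using hy)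
    rw [gIdx_append]
    simp [hyx]
  · rw [gIdx_append, gIdx_nil_of_not_mem l x hx]
    simp

lemma A_loop (l : List Int) :
    (PySem.List.enumerate l 0).foldl uiStep ([], [], PySem.Dict.empty)
      = (PySem.Set.ofList l, (PySem.Set.ofList l).map (gIdx l), seenOf l) := by
  induction l using List.reverseRecOn with
  | nil => rfl
  | append_singleton l x ih =>
    rw [PySem.List.enumerate_append, List.foldl_append, ih]
    simp only [PySem.List.enumerate_cons, PySem.List.enumerate_nil, List.foldl_cons, List.foldl_nil,
      zero_add]
    by_cases hx : x ∈ l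
    · -- x already seen
      have hS : PySem.Set.ofList (l ++ [x]) = PySem.Set.ofList l := by
        rw [PySem.Set.ofList_append_singleton,
          PySem.Set.add_of_mem (by simpa [PySem.Set.mem_ofList] using hx)]
      obtain ⟨k, hk, hSk⟩ := List.mem_iff_getElem.mp
        (show x ∈ PySem.Set.ofList l by simpa [PySem.Set.mem_ofList] using hx)
      simp only [uiStep, contains_seenOf, hx, decide_true, Bool.not_true, Bool.false_eq_true,
        if_false]
      rw [hS, seenOf_append_mem l x hx, getD_seenOf l x k hk hSk]
      simp only [PySem.List.pySetD_natCast, PySem.List.pyGetD_natCast]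
      rw [List.getD_eq_getElem _ _ (by simpa using hk), List.getElem_map, hSk]
      rw [set_map_gIdx_mem l x k hk hSk]
    · -- x is fresh
      have hS : PySem.Set.ofList (l ++ [x]) = PySem.Set.ofList l ++ [x] := by
        rw [PySem.Set.ofList_append_singleton,
          PySem.Set.add_of_not_mem (by simpa [PySem.Set.mem_ofList] using hx)]
      simp only [uiStep, contains_seenOf, hx, decide_false, Bool.not_false, if_true]
      rw [seenOf_append_fresh l x hx, hS]
      have hj : (seenOf (l ++ [x])).getD x 0 = ((PySem.Set.ofList l).length : Int) := by
        apply getD_seenOf (l ++ [x]) x (PySem.Set.ofList l).length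
        · simp [hS]
        · simp [hS]
      rw [hj]
      simp only [PySem.List.pySetD_natCast, PySem.List.pyGetD_natCast]
      rw [List.getD_eq_getElem _ _ (by simp), List.getElem_append_right (by simp)]
      simp only [List.length_map, Nat.sub_self, List.getElem_cons_zero]
      rw [set_map_gIdx_fresh l x hx]

lemma B_char (A : List Int) :
    unique_inverse_alt A = (PySem.Set.ofList A, (PySem.Set.ofList A).map (gIdx A)) := rfl

-- ===== VERDICT (by name: the statement is the Claim_ definition above) =====
theorem unique_inverse_spec : Claim_equal_unique_inverse := by
  intro A _
  show unique_inverse A = unique_inverse_alt A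
  rw [B_char, unique_inverse, A_loop]
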